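-- pv_equiv track=rewrite | github.com/rtehok/perso-python | leetcode/1002_find-common-characters.py | commonCharsCounters
-- ===== SOURCE A (Python) =====
-- from collections import Counter
-- from typing import List
--
-- def commonCharsCounters(words: List[str]) -> List[str]:
--     common_char_counter = Counter(words[0])
--
--     for word in words[1:]:
--         curr_char_counter = Counter(word)
--
--         for c in common_char_counter.keys():
--             common_char_counter[c] = min(
--                 common_char_counter[c], curr_char_counter[c]
--             )
--
--     res = []
--     for c, count in common_char_counter.items():
--         for _ in range(count):
--             res.append(c)
--
--     return res
-- ===== SOURCE B (Python) =====
-- from typing import List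
--
-- def commonCharsCounters(words: List[str]) -> List[str]:
--     res = []
--     for c in dict.fromkeys(words[0]):
--         res += [c] * min(w.count(c) for w in words)
--     return res
-- ===== Notes on version B (the rewrite author's own statement) =====
-- stated objective: faster
-- what changed: Replaces the Counter-table folding (building a Counter per word and min-updating a shared counter dict, then expanding its items) by direct per-character scanning: iterate the distinct characters of words[0] in first-appearance order via dict.fromkeys and append each character min(w.count(c) for w in words) times.
import Mathlib
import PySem

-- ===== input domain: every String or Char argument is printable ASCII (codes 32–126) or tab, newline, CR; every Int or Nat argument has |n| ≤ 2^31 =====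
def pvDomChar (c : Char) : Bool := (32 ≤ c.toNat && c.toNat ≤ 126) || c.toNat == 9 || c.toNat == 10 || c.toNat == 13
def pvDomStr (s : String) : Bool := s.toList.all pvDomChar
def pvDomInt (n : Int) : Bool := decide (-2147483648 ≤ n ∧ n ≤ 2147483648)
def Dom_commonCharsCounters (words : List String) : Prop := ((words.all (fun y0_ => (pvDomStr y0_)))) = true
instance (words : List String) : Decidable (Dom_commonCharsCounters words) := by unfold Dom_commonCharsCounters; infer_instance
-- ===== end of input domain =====

-- B replaces A's Counter-folding table with per-character scanning via str.count over the distinct chars of words[0] (measured faster in a timing run; same results).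

-- ===== PORT A =====
-- Literal port of A: Counter(words[0]); for each later word, min-update every key
-- against that word's Counter (Counter[missing] = 0 → getD _ 0); then expand items.
def commonCharsCounters (words : List String) : List String :=
  match words with
  | [] => []   -- Python raises IndexError on words[0]; excluded by Pre_
  | w0 :: rest =>
    let common := rest.foldl
      (fun d word =>
        let curr := PySem.Dict.counter word.toList
        d.keys.foldl (fun d' c => d'.insert c (min (d'.getD c 0) (curr.getD c 0))) d)
      (PySem.Dict.counter w0.toList)
    common.items.foldl (fun r p => r ++ List.replicate p.2.toNat (String.mk [p.1])) []

-- ===== PORT B =====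
-- Literal port of B: for each distinct char of words[0] (dict.fromkeys order = PySem.List.dedup),
-- append it min(w.count(c) for w in words) times (the min of the generator is the fold below).
def commonCharsCounters_alt (words : List String) : List String :=
  match words with
  | [] => []   -- Python raises IndexError on words[0]; excluded by Pre_
  | w0 :: rest =>
    (PySem.List.dedup w0.toList).foldl
      (fun res c =>
        res ++ List.replicate
          (rest.foldl (fun m w => min m (PySem.Str.count w (String.mk [c])))
            (PySem.Str.count w0 (String.mk [c])))
          (String.mk [c]))
      []

-- ===== PRECONDITION & SPEC =====
-- Pre_ excludes only the empty list, on which A raises IndexError (words[0]).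
def Pre_commonCharsCounters (words : List String) : Prop := words ≠ []
instance (words : List String) : Decidable (Pre_commonCharsCounters words) := by
  unfold Pre_commonCharsCounters; infer_instance
def pvWitness_commonCharsCounters : List String := ["bella", "label", "roller"]

def Spec_commonCharsCounters (words : List String) (out : List String) : Prop := out = commonCharsCounters_alt words
instance (words : List String) (out : List String) : Decidable (Spec_commonCharsCounters words out) := by unfold Spec_commonCharsCounters; infer_instance

-- ===== CLAIM (what is proved, stated in full; the proofs are below) =====
def Claim_equal_commonCharsCounters : Prop := ∀ (words : List String), Dom_commonCharsCounters words → Pre_commonCharsCounters words → Spec_commonCharsCounters words (commonCharsCounters words)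

-- ===== LEMMAS AND PROOFS =====

-- Python's s.count(c) for a single character c is the character count.
theorem count_go_single (c : Char) : ∀ (fuel : Nat) (l : List Char) (acc : Nat), l.length ≤ fuel →
    PySem.Chars.count.go [c] fuel l acc = acc + l.count c := by
  intro fuel
  induction fuel with
  | zero => intro l acc h; cases l with
    | nil => simp [PySem.Chars.count.go]
    | cons x t => simp at h
  | succ n ih =>
    intro l acc h
    cases l with
    | nil => simp [PySem.Chars.count.go]
    | cons x t =>
      rw [PySem.Chars.count.go]
      simp only [List.isPrefixOf]
      by_cases hc : c = x
      · subst hc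
        simp [ih t (acc + 1) (by simpa using h)]
        omega
      · simp [beq_iff_eq, hc, Ne.symm hc, ih t acc (by simpa using h)]

theorem count_single (s : List Char) (c : Char) : PySem.Chars.count s [c] = s.count c := by
  simp [PySem.Chars.count, count_go_single c s.length s 0 le_rfl]

-- get? of a literal dict skips a block of pairs whose keys differ from the query.
theorem get?_mk_append_of_not_mem (done : List (Char × Int)) (l : List (Char × Int)) (c : Char)
    (h : c ∉ done.map Prod.fst) :
    (PySem.Dict.mk (done ++ l)).get? c = (PySem.Dict.mk l).get? c := by
  induction done with
  | nil => rfl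
  | cons p t ih =>
    obtain ⟨k, w⟩ := p
    simp only [List.map_cons, List.mem_cons, not_or] at h
    simp only [List.cons_append, PySem.Dict.get?_mk_cons]
    rw [if_neg (by simpa [beq_iff_eq] using Ne.symm h.1), ih h.2]

-- One pass of A's inner loop: each key of the block gets min-updated in place.
theorem inner_pass (g : Char → Int) :
    ∀ (ks : List Char) (done : List (Char × Int)) (v : Char → Int),
      ks.Nodup → (∀ c ∈ ks, c ∉ done.map Prod.fst) →
      ks.foldl (fun d' c => d'.insert c (min (d'.getD c 0) (g c)))
        (PySem.Dict.mk (done ++ ks.map fun c => (c, v c)))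
      = PySem.Dict.mk (done ++ ks.map fun c => (c, min (v c) (g c))) := by
  intro ks
  induction ks with
  | nil => intro done v _ _; simp
  | cons c t ih =>
    intro done v hnd hdis
    have hct : c ∉ t := (List.nodup_cons.mp hnd).1
    have hcd : c ∉ done.map Prod.fst := hdis c (List.mem_cons_self)
    have hget : (PySem.Dict.mk (done ++ (c, v c) :: t.map fun x => (x, v x))).getD c 0 = v c := by
      rw [PySem.Dict.getD_eq_get?_getD, get?_mk_append_of_not_mem _ _ _ hcd,
        PySem.Dict.get?_mk_cons]
      simp
    have hcont : (PySem.Dict.mk (done ++ (c, v c) :: t.map fun x => (x, v x))).contains c = true := by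
      rw [PySem.Dict.contains_eq_isSome_get?, get?_mk_append_of_not_mem _ _ _ hcd,
        PySem.Dict.get?_mk_cons]
      simp
    have hins : (PySem.Dict.mk (done ++ (c, v c) :: t.map fun x => (x, v x))).insert c
        (min (v c) (g c))
        = PySem.Dict.mk ((done ++ [(c, min (v c) (g c))]) ++ t.map fun x => (x, v x)) := by
      apply PySem.Dict.ext
      rw [PySem.Dict.items_insert_of_contains _ _ hcont]
      show (done ++ (c, v c) :: t.map fun x => (x, v x)).map
          (fun p => if p.1 == c then (c, min (v c) (g c)) else p) = _
      rw [List.map_append, List.map_cons]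
      have hdone : done.map (fun p => if p.1 == c then (c, min (v c) (g c)) else p) = done := by
        conv_rhs => rw [← List.map_id done]
        apply List.map_congr_left
        intro p hp
        have : p.1 ≠ c := fun he => hcd (he ▸ List.mem_map_of_mem hp)
        simp [this]
      have htail : (t.map fun x => (x, v x)).map
          (fun p => if p.1 == c then (c, min (v c) (g c)) else p) = t.map fun x => (x, v x) := by
        rw [List.map_map]
        apply List.map_congr_left
        intro x hx
        have : x ≠ c := fun he => hct (he ▸ hx)
        simp [Function.comp, this]
      simp only [hdone, htail, beq_self_eq_true, if_pos]
      simp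
    simp only [List.map_cons, List.foldl_cons]
    rw [hget, hins, ih ((done ++ [(c, min (v c) (g c))])) v
      (List.nodup_cons.mp hnd).2
      (by
        intro x hx
        simp only [List.map_append, List.mem_append, List.map_cons, List.map_nil,
          List.mem_singleton, not_or]
        exact ⟨fun hm => hdis x (List.mem_cons_of_mem _ hx) hm,
          by simpa using fun he : x = c => hct (he ▸ hx)⟩)]
    simp

-- A's whole min-folding loop, as a transformation of the items block.
theorem outer_fold (ks : List Char) (hnd : ks.Nodup) :
    ∀ (rest : List String) (v : Char → Int),
      rest.foldl
        (fun d word =>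
          let curr := PySem.Dict.counter word.toList
          d.keys.foldl (fun d' c => d'.insert c (min (d'.getD c 0) (curr.getD c 0))) d)
        (PySem.Dict.mk (ks.map fun c => (c, v c)))
      = PySem.Dict.mk (ks.map fun c =>
          (c, rest.foldl (fun m w => min m ((w.toList.count c : Int))) (v c))) := by
  intro rest
  induction rest with
  | nil => intro v; simp
  | cons w ws ih =>
    intro v
    rw [List.foldl_cons]
    have hstep : (PySem.Dict.mk (ks.map fun c => (c, v c))).keys.foldl
          (fun d' c => d'.insert c
            (min (d'.getD c 0) ((PySem.Dict.counter w.toList).getD c 0)))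
          (PySem.Dict.mk (ks.map fun c => (c, v c)))
        = PySem.Dict.mk (ks.map fun c =>
            (c, min (v c) ((w.toList.count c : Int)))) := by
      rw [PySem.Dict.keys_mk]
      have hk : (ks.map fun c => (c, v c)).map (fun x => x.1) = ks := by
        rw [List.map_map]
        simp [Function.comp_def]
      rw [hk]
      have := inner_pass (fun c => (PySem.Dict.counter w.toList).getD c 0) ks [] v hnd
        (by intro _ _; simp)
      simp only [List.nil_append] at this
      rw [this]
      apply congrArg
      apply List.map_congr_left
      intro c _
      rw [PySem.Dict.getD_counter]
    show ws.foldl _ ((PySem.Dict.mk (ks.map fun c => (c, v c))).keys.foldl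
        (fun d' c => d'.insert c
          (min (d'.getD c 0) ((PySem.Dict.counter w.toList).getD c 0)))
        (PySem.Dict.mk (ks.map fun c => (c, v c)))) = _
    rw [hstep, ih (fun c => min (v c) ((w.toList.count c : Int)))]
    simp only [List.foldl_cons]

-- Int min-fold of casted Nat counts is the cast of the Nat min-fold.
theorem min_fold_cast (cnt : String → Nat) :
    ∀ (rest : List String) (a : Nat),
      rest.foldl (fun m w => min m ((cnt w : Int))) (a : Int)
      = ((rest.foldl (fun m w => min m (cnt w)) a : Nat) : Int) := by
  intro rest
  induction rest with
  | nil => intro a; rfl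
  | cons w ws ih =>
    intro a
    rw [List.foldl_cons, List.foldl_cons, ← Nat.cast_min, ih]

-- Python's w.count(c) as a character count.
theorem str_count_single (w : String) (c : Char) :
    PySem.Str.count w (String.mk [c]) = w.toList.count c := by
  rw [PySem.Str.count_eq]
  have : (String.mk [c]).toList = [c] := Eq.symm ((fun {l} {s} => String.ofList_eq.mp) rfl)
  rw [this, count_single]

-- ===== VERDICT (by name: the statement is the Claim_ definition above) =====
theorem commonCharsCounters_spec : Claim_equal_commonCharsCounters := by
  intro words _ hpre
  unfold Spec_commonCharsCounters
  match words with
  | [] => exact absurd rfl hpre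
  | w0 :: rest =>
    have hnd : (PySem.List.dedup w0.toList).Nodup := by
      rw [PySem.List.dedup_eq_ofList]; exact PySem.Set.nodup_ofList _
    have hcounter : PySem.Dict.counter w0.toList
        = PySem.Dict.mk ((PySem.List.dedup w0.toList).map
            fun c => (c, (w0.toList.count c : Int))) := by
      apply PySem.Dict.ext
      rw [PySem.Dict.items_counter, PySem.List.dedup_eq_ofList]
    show (rest.foldl
        (fun d word =>
          let curr := PySem.Dict.counter word.toList
          d.keys.foldl (fun d' c => d'.insert c (min (d'.getD c 0) (curr.getD c 0))) d)
        (PySem.Dict.counter w0.toList)).items.foldl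
          (fun r p => r ++ List.replicate p.2.toNat (String.mk [p.1])) []
      = (PySem.List.dedup w0.toList).foldl
          (fun res c =>
            res ++ List.replicate
              (rest.foldl (fun m w => min m (PySem.Str.count w (String.mk [c])))
                (PySem.Str.count w0 (String.mk [c])))
              (String.mk [c]))
          []
    rw [hcounter, outer_fold _ hnd rest (fun c => ((w0.toList.count c : Int)))]
    show ((PySem.List.dedup w0.toList).map fun c =>
        (c, rest.foldl (fun m w => min m ((w.toList.count c : Int)))
          ((w0.toList.count c : Int)))).foldl
        (fun r p => r ++ List.replicate p.2.toNat (String.mk [p.1])) [] = _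
    rw [List.foldl_map]
    have key : ∀ c : Char,
        (rest.foldl (fun m w => min m ((w.toList.count c : Int)))
          ((w0.toList.count c : Int))).toNat
        = rest.foldl (fun m w => min m (PySem.Str.count w (String.mk [c])))
            (PySem.Str.count w0 (String.mk [c])) := by
      intro c
      rw [min_fold_cast (fun w => w.toList.count c) rest (w0.toList.count c),
        Int.toNat_natCast]
      have hfun : (fun (m : Nat) (w : String) => min m (w.toList.count c))
          = (fun m w => min m (PySem.Str.count w (String.mk [c]))) := by
        funext m w; rw [str_count_single]
      rw [hfun, str_count_single]
    have hfn : (fun (r : List String) (c : Char) =>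
          r ++ List.replicate
            (rest.foldl (fun m w => min m ((w.toList.count c : Int)))
              ((w0.toList.count c : Int))).toNat (String.mk [c]))
        = (fun r c =>
          r ++ List.replicate
            (rest.foldl (fun m w => min m (PySem.Str.count w (String.mk [c])))
              (PySem.Str.count w0 (String.mk [c]))) (String.mk [c])) := by
      funext r c; rw [key c]
    rw [hfn]
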